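-- pv_equiv track=rewrite | github.com/stenknutsen/HomeGrownPOSTagger | PhaseFourTagging.py | DT_UNK_UNK_PUNC_Tagger
-- ===== SOURCE A (Python) =====
-- def DT_UNK_UNK_PUNC_Tagger(sent):
--     sentToReturn = []
--     skip = 0
--
--     for i in range(len(sent)):
--
--         if skip>0:
--             skip = skip -1
--             continue
--
--
--         if (i)<0 | (i+3)>=len(sent):
--             sentToReturn += [sent[i]]
--             continue
--
--         leftContext = sent[i]
--         leftTarget = sent[i+1]
--         rightTarget = sent[i+2]
--         rightContext = sent[i+3]
--
--
--         if ((leftContext[1]=="DT"))&(leftTarget[1]=="UNK")&(rightTarget[1]=="UNK")&((rightContext[1]==".")|(rightContext[1]==";")):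
--
--             sentToReturn += [leftContext]
--
--             newTup = (leftTarget[0], "J")
--             sentToReturn += [newTup]
--
--             newTup = (rightTarget[0], "N")
--             sentToReturn += [newTup]
--
--             sentToReturn += [rightContext]
--             skip = 3
--
--         else:
--             sentToReturn += [leftContext]
--
--     return sentToReturn
-- ===== SOURCE B (Python) =====
-- def DT_UNK_UNK_PUNC_Tagger(sent):
--     if len(sent) >= 4 and sent[0][1] == "DT" and sent[1][1] == "UNK" \
--             and sent[2][1] == "UNK" and sent[3][1] in (".", ";"):
--         return [sent[0], (sent[1][0], "J"), (sent[2][0], "N"), sent[3]] \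
--             + DT_UNK_UNK_PUNC_Tagger(sent[4:])
--     if sent:
--         return [sent[0]] + DT_UNK_UNK_PUNC_Tagger(sent[1:])
--     return []
-- ===== Notes on version B (the rewrite author's own statement) =====
-- stated objective: alternative
-- what changed: Replaced A's index loop over range(len(sent)) with a skip-counter state machine and an operator-precedence boundary guard by direct structural recursion on the list: match the 4-window at the head, emit the retagged window and recurse on the rest, else emit the head and recurse on the tail.
import Mathlib
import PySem

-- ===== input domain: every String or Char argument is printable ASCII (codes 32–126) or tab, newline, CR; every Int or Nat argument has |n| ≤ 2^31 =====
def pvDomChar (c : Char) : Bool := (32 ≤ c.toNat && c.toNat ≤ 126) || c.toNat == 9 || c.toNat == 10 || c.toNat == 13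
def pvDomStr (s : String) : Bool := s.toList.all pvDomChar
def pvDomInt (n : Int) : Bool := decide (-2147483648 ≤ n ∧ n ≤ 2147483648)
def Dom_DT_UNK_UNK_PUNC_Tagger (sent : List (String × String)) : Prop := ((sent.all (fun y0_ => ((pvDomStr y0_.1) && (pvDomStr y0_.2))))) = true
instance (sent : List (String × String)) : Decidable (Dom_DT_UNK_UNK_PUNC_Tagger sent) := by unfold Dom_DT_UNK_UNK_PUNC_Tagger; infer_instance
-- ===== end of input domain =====

-- B replaces A's index loop with a skip counter by direct structural recursion on the list
-- (match the 4-window at the head, emit and drop 4, else emit the head): objective 'alternative'.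

-- ===== PORT A =====
-- one loop iteration of A: state is (sentToReturn, skip)
def pvStepA (sent : List (String × String)) (st : List (String × String) × Int) (i : Int) :
    List (String × String) × Int :=
  if st.2 > 0 then (st.1, st.2 - 1)
  else if i < Int.lor 0 (i + 3) ∧ Int.lor 0 (i + 3) ≥ (sent.length : Int) then
    (st.1 ++ [PySem.List.pyGetD sent i ("", "")], st.2)
  else
    let leftContext := PySem.List.pyGetD sent i ("", "")
    let leftTarget := PySem.List.pyGetD sent (i + 1) ("", "")
    let rightTarget := PySem.List.pyGetD sent (i + 2) ("", "")
    let rightContext := PySem.List.pyGetD sent (i + 3) ("", "")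
    if (leftContext.2 == "DT") && (leftTarget.2 == "UNK") && (rightTarget.2 == "UNK") &&
        ((rightContext.2 == ".") || (rightContext.2 == ";")) then
      (st.1 ++ [leftContext] ++ [(leftTarget.1, "J")] ++ [(rightTarget.1, "N")] ++ [rightContext], 3)
    else
      (st.1 ++ [leftContext], st.2)

def DT_UNK_UNK_PUNC_Tagger (sent : List (String × String)) : List (String × String) :=
  ((PySem.List.pyRange 0 (sent.length : Int) 1).foldl (pvStepA sent) ([], 0)).1

-- ===== PORT B =====
def DT_UNK_UNK_PUNC_Tagger_alt : List (String × String) → List (String × String)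
  | a :: b :: c :: d :: rest =>
    if a.2 == "DT" && b.2 == "UNK" && c.2 == "UNK" && (d.2 == "." || d.2 == ";") then
      a :: (b.1, "J") :: (c.1, "N") :: d :: DT_UNK_UNK_PUNC_Tagger_alt rest
    else
      a :: DT_UNK_UNK_PUNC_Tagger_alt (b :: c :: d :: rest)
  | xs => xs
termination_by xs => xs.length
decreasing_by all_goals simp <;> omega

-- ===== PRECONDITION & SPEC =====
def Spec_DT_UNK_UNK_PUNC_Tagger (sent : List (String × String)) (out : List (String × String)) : Prop := out = DT_UNK_UNK_PUNC_Tagger_alt sent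
instance (sent : List (String × String)) (out : List (String × String)) : Decidable (Spec_DT_UNK_UNK_PUNC_Tagger sent out) := by unfold Spec_DT_UNK_UNK_PUNC_Tagger; infer_instance

-- ===== CLAIM (what is proved, stated in full; the proofs are below) =====
def Claim_equal_DT_UNK_UNK_PUNC_Tagger : Prop := ∀ (sent : List (String × String)), Dom_DT_UNK_UNK_PUNC_Tagger sent → Spec_DT_UNK_UNK_PUNC_Tagger sent (DT_UNK_UNK_PUNC_Tagger sent)

-- ===== LEMMAS AND PROOFS =====

theorem pv_zero_lor (i : Int) : Int.lor 0 i = i := by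
  cases i <;> simp [Int.lor, Nat.ldiff]

-- B returns short lists unchanged
theorem alt_short (xs : List (String × String)) (h : xs.length < 4) :
    DT_UNK_UNK_PUNC_Tagger_alt xs = xs := by
  match xs, h with
  | [], _ => simp [DT_UNK_UNK_PUNC_Tagger_alt]
  | [_], _ => simp [DT_UNK_UNK_PUNC_Tagger_alt]
  | [_, _], _ => simp [DT_UNK_UNK_PUNC_Tagger_alt]
  | [_, _, _], _ => simp [DT_UNK_UNK_PUNC_Tagger_alt]

-- main invariant: the fold over the remaining indices, with no pending skip, appends B of the suffix
theorem runA_eq (sent : List (String × String)) :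
    ∀ fuel k acc, sent.length - k ≤ fuel →
    ((PySem.List.pyRange (k : Int) (sent.length : Int) 1).foldl (pvStepA sent) (acc, 0)).1
      = acc ++ DT_UNK_UNK_PUNC_Tagger_alt (sent.drop k) := by
  intro fuel
  induction fuel with
  | zero =>
    intro k acc h
    have hk : sent.length ≤ k := by omega
    rw [PySem.List.pyRange_one_eq_nil (by exact_mod_cast hk), List.drop_eq_nil_of_le hk]
    simp [DT_UNK_UNK_PUNC_Tagger_alt]
  | succ f ih =>
    intro k acc h
    by_cases hk : sent.length ≤ k
    · rw [PySem.List.pyRange_one_eq_nil (by exact_mod_cast hk), List.drop_eq_nil_of_le hk]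
      simp [DT_UNK_UNK_PUNC_Tagger_alt]
    · have hk' : k < sent.length := by omega
      rw [PySem.List.pyRange_one_cons (by exact_mod_cast hk'), List.foldl_cons]
      have hget0 : PySem.List.pyGetD sent (k : Int) ("", "") = sent[k] := by
        rw [PySem.List.pyGetD_natCast]; exact List.getD_eq_getElem _ _ hk'
      have hd1 : sent.drop k = sent[k] :: sent.drop (k+1) := List.drop_eq_getElem_cons hk'
      by_cases hb : sent.length ≤ k + 3
      · -- boundary branch of A; B leaves short suffixes unchanged
        have hstep : pvStepA sent (acc, 0) (k : Int) = (acc ++ [sent[k]], 0) := by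
          simp only [pvStepA, pv_zero_lor, hget0]
          rw [if_neg (by simp), if_pos ⟨by omega, by exact_mod_cast hb⟩]
        have ecast : ((k : Int) + 1) = ((k + 1 : Nat) : Int) := by push_cast; ring
        rw [hstep, ecast, ih (k+1) (acc ++ [sent[k]]) (by omega)]
        rw [alt_short _ (by simp; omega), hd1, alt_short _ (by simp; omega)]
        simp
      · have hb' : k + 3 < sent.length := by omega
        have hget1 : PySem.List.pyGetD sent ((k : Int) + 1) ("", "") = sent[k+1] := by
          have e : ((k : Int) + 1) = ((k + 1 : Nat) : Int) := by push_cast; ring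
          rw [e, PySem.List.pyGetD_natCast]; exact List.getD_eq_getElem _ _ (by omega)
        have hget2 : PySem.List.pyGetD sent ((k : Int) + 2) ("", "") = sent[k+2] := by
          have e : ((k : Int) + 2) = ((k + 2 : Nat) : Int) := by push_cast; ring
          rw [e, PySem.List.pyGetD_natCast]; exact List.getD_eq_getElem _ _ (by omega)
        have hget3 : PySem.List.pyGetD sent ((k : Int) + 3) ("", "") = sent[k+3] := by
          have e : ((k : Int) + 3) = ((k + 3 : Nat) : Int) := by push_cast; ring
          rw [e, PySem.List.pyGetD_natCast]; exact List.getD_eq_getElem _ _ (by omega)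
        have hcondF : ¬ ((k : Int) < Int.lor 0 ((k : Int) + 3) ∧ Int.lor 0 ((k : Int) + 3) ≥ (sent.length : Int)) := by
          rw [pv_zero_lor]; omega
        have hd2 : sent.drop (k+1) = sent[k+1] :: sent.drop (k+2) := List.drop_eq_getElem_cons (by omega)
        have hd3 : sent.drop (k+2) = sent[k+2] :: sent.drop (k+3) := List.drop_eq_getElem_cons (by omega)
        have hd4 : sent.drop (k+3) = sent[k+3] :: sent.drop (k+4) := List.drop_eq_getElem_cons (by omega)
        have hstep : pvStepA sent (acc, 0) (k : Int) =
            (if sent[k].2 == "DT" && sent[k+1].2 == "UNK" && sent[k+2].2 == "UNK" &&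
                (sent[k+3].2 == "." || sent[k+3].2 == ";") then
              (acc ++ [sent[k]] ++ [(sent[k+1].1, "J")] ++ [(sent[k+2].1, "N")] ++ [sent[k+3]], 3)
            else (acc ++ [sent[k]], 0)) := by
          simp only [pvStepA, hget0, hget1, hget2, hget3]
          rw [if_neg (by simp), if_neg hcondF]
        rw [hstep]
        by_cases hc : (sent[k].2 == "DT" && sent[k+1].2 == "UNK" && sent[k+2].2 == "UNK" &&
            (sent[k+3].2 == "." || sent[k+3].2 == ";")) = true
        · rw [if_pos hc]
          have e1 : PySem.List.pyRange ((k : Int) + 1) (sent.length : Int) 1 =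
              ((k : Int) + 1) :: ((k : Int) + 1 + 1) :: ((k : Int) + 1 + 1 + 1) ::
              PySem.List.pyRange ((k : Int) + 1 + 1 + 1 + 1) (sent.length : Int) 1 := by
            rw [PySem.List.pyRange_one_cons (by omega),
                PySem.List.pyRange_one_cons (by omega),
                PySem.List.pyRange_one_cons (by omega)]
          rw [e1]
          simp only [List.foldl_cons]
          have s3 : ∀ i, pvStepA sent
              (acc ++ [sent[k]] ++ [(sent[k+1].1, "J")] ++ [(sent[k+2].1, "N")] ++ [sent[k+3]], 3) i =
              (acc ++ [sent[k]] ++ [(sent[k+1].1, "J")] ++ [(sent[k+2].1, "N")] ++ [sent[k+3]], 2) := by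
            intro i; norm_num [pvStepA]
          have s2 : ∀ i, pvStepA sent
              (acc ++ [sent[k]] ++ [(sent[k+1].1, "J")] ++ [(sent[k+2].1, "N")] ++ [sent[k+3]], 2) i =
              (acc ++ [sent[k]] ++ [(sent[k+1].1, "J")] ++ [(sent[k+2].1, "N")] ++ [sent[k+3]], 1) := by
            intro i; norm_num [pvStepA]
          have s1 : ∀ i, pvStepA sent
              (acc ++ [sent[k]] ++ [(sent[k+1].1, "J")] ++ [(sent[k+2].1, "N")] ++ [sent[k+3]], 1) i =
              (acc ++ [sent[k]] ++ [(sent[k+1].1, "J")] ++ [(sent[k+2].1, "N")] ++ [sent[k+3]], 0) := by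
            intro i; norm_num [pvStepA]
          rw [s3, s2, s1]
          have ecast : ((k : Int) + 1 + 1 + 1 + 1) = ((k + 4 : Nat) : Int) := by push_cast; ring
          rw [ecast, ih (k+4) _ (by omega)]
          rw [hd1, hd2, hd3, hd4]
          simp only [DT_UNK_UNK_PUNC_Tagger_alt]
          rw [if_pos hc]
          simp
        · rw [if_neg hc]
          have ecast : ((k : Int) + 1) = ((k + 1 : Nat) : Int) := by push_cast; ring
          rw [ecast, ih (k+1) (acc ++ [sent[k]]) (by omega)]
          rw [hd1, hd2, hd3, hd4]
          simp only [DT_UNK_UNK_PUNC_Tagger_alt]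
          rw [if_neg hc, ← hd4, ← hd3, ← hd2]
          simp

-- ===== VERDICT (by name: the statement is the Claim_ definition above) =====
theorem DT_UNK_UNK_PUNC_Tagger_spec : Claim_equal_DT_UNK_UNK_PUNC_Tagger := by
  intro sent _
  unfold Spec_DT_UNK_UNK_PUNC_Tagger DT_UNK_UNK_PUNC_Tagger
  have h := runA_eq sent sent.length 0 [] (by omega)
  simpa using h
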